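-- pv_equiv track=rewrite | github.com/baidu/duedge-cli | duedge_cli/utils.py | find_match_characters
-- ===== SOURCE A (Python) =====
-- def find_match_characters(string, pattern):
--     """Find match match pattern string.
--     Args:
--         params: string
--                 pattern
--     Returns:
--     Raises:
--     """
--     matched = []
--     last_index = 0
--
--     if not string or not pattern:
--         return matched
--
--     if string[0] != pattern[0]:
--         return matched
--
--     for c in pattern:
--         index = string.find(c, last_index)
--         if index < 0:
--             return []
--
--         matched.append((c, index))
--         last_index = index + 1
--
--     return matched
-- ===== SOURCE B (Python) =====
-- def _bisect_left(lst, x):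
--     lo, hi = 0, len(lst)
--     while lo < hi:
--         mid = (lo + hi) // 2
--         if lst[mid] < x:
--             lo = mid + 1
--         else:
--             hi = mid
--     return lo
--
--
-- def find_match_characters(string, pattern):
--     """Greedy left-to-right match of pattern chars in string.
--
--     Builds a position index per character once, then binary-searches each
--     list for the next occurrence at or after last_index, instead of
--     calling string.find(c, last_index) per pattern character.
--     """
--     if not string or not pattern or string[0] != pattern[0]:
--         return []
--
--     pos = {}
--     for i, ch in enumerate(string):
--         pos.setdefault(ch, []).append(i)
--
--     matched = []
--     last_index = 0
--     for c in pattern: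
--         lst = pos.get(c, [])
--         j = _bisect_left(lst, last_index)
--         if j == len(lst):
--             return []
--         idx = lst[j]
--         matched.append((c, idx))
--         last_index = idx + 1
--     return matched
-- ===== Notes on version B (the rewrite author's own statement) =====
-- stated objective: alternative
-- what changed: B precomputes a per-character list of occurrence positions once and binary-searches it for the first occurrence at or after last_index, instead of calling string.find(c, last_index) for every pattern character.
import Mathlib
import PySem

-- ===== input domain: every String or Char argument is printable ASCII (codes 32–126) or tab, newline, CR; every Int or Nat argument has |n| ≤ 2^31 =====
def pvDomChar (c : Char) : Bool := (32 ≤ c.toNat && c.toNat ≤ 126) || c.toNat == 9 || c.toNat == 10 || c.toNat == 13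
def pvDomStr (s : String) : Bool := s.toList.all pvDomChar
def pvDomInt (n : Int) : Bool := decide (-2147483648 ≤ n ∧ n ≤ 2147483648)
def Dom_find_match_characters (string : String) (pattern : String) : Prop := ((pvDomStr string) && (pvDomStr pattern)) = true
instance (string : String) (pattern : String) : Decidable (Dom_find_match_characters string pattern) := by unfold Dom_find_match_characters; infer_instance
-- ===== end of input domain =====

-- B replaces A's per-pattern-character call to string.find(c, last_index) by a
-- per-character position index built once plus a binary search per pattern char.

-- ===== PORT A =====
-- the 'for c in pattern' loop: state (matched, last_index), early 'return []' on a miss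
def fmcA_loop (s : List Char) : List Char → List (String × Int) → Int → List (String × Int)
  | [], matched, _ => matched
  | c :: rest, matched, last =>
    let index := PySem.Chars.findFrom s [c] last none
    if index < 0 then []
    else fmcA_loop s rest (matched ++ [(String.ofList [c], index)]) (index + 1)

def find_match_characters (string : String) (pattern : String) : List (String × Int) :=
  let s := string.toList
  let p := pattern.toList
  if s = [] ∨ p = [] then []
  else if s.head? ≠ p.head? then []
  else fmcA_loop s p [] 0

-- ===== PORT B =====
-- hand-written _bisect_left from Source B (lo, hi are the nonnegative loop variables)
def fmcB_bisect (lst : List Int) (x : Int) (lo hi : Nat) : Nat :=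
  if h : lo < hi then
    let mid := (lo + hi) / 2
    if lst.getD mid 0 < x then fmcB_bisect lst x (mid + 1) hi
    else fmcB_bisect lst x lo mid
  else lo
termination_by hi - lo
decreasing_by all_goals omega

-- pos = {}; for i, ch in enumerate(string): pos.setdefault(ch, []).append(i)
def fmcB_pos (s : List Char) : PySem.Dict Char (List Int) :=
  (PySem.List.enumerate s).foldl (fun d p => d.modify p.2 [] (· ++ [p.1])) PySem.Dict.empty

def fmcB_loop (pos : PySem.Dict Char (List Int)) : List Char → List (String × Int) → Int → List (String × Int)
  | [], matched, _ => matched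
  | c :: rest, matched, last =>
    let lst := pos.getD c []
    let j := fmcB_bisect lst last 0 lst.length
    if j = lst.length then []
    else
      let idx := lst.getD j 0
      fmcB_loop pos rest (matched ++ [(String.ofList [c], idx)]) (idx + 1)

def find_match_characters_alt (string : String) (pattern : String) : List (String × Int) :=
  let s := string.toList
  let p := pattern.toList
  if s = [] ∨ p = [] ∨ s.head? ≠ p.head? then []
  else fmcB_loop (fmcB_pos s) p [] 0

-- ===== PRECONDITION & SPEC =====
def Spec_find_match_characters (string : String) (pattern : String) (out : List (String × Int)) : Prop := out = find_match_characters_alt string pattern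
instance (string : String) (pattern : String) (out : List (String × Int)) : Decidable (Spec_find_match_characters string pattern out) := by unfold Spec_find_match_characters; infer_instance

-- ===== CLAIM (what is proved, stated in full; the proofs are below) =====
def Claim_equal_find_match_characters : Prop := ∀ (string : String) (pattern : String), Dom_find_match_characters string pattern → Spec_find_match_characters string pattern (find_match_characters string pattern)

-- ===== LEMMAS AND PROOFS =====

theorem fmcB_pos_getD (s : List Char) (c : Char) :
    (fmcB_pos s).getD c [] =
      ((PySem.List.enumerate s).filter (fun p => p.2 == c)).map (·.1) := by
  unfold fmcB_pos
  rw [show ((PySem.List.enumerate s).foldl (fun d p => d.modify p.2 [] (· ++ [p.1])) PySem.Dict.empty)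
      = (((PySem.List.enumerate s).map (fun p => (p.2, p.1))).foldl
          (fun d q => d.modify q.1 [] (· ++ [q.2])) PySem.Dict.empty) from (List.foldl_map (f := fun p : Int × Char => (p.2, p.1)) (g := fun (d : PySem.Dict Char (List Int)) q => d.modify q.1 [] (· ++ [q.2]))).symm]
  rw [PySem.Dict.getD_foldl_modify_append]
  simp [List.filter_map, List.map_map, Function.comp_def]

theorem fmcB_pos_mem (s : List Char) (c : Char) (v : Int) :
    v ∈ (fmcB_pos s).getD c [] ↔ ∃ (m : Nat) (h : m < s.length), v = (m : Int) ∧ s[m] = c := by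
  rw [fmcB_pos_getD]
  simp only [List.mem_map, List.mem_filter, PySem.List.mem_enumerate_iff]
  constructor
  · rintro ⟨p, ⟨⟨m, hm, rfl⟩, hc⟩, rfl⟩
    exact ⟨m, hm, by simp, by simpa using hc⟩
  · rintro ⟨m, hm, rfl, hc⟩
    exact ⟨((m : Int), s[m]), ⟨⟨m, hm, by simp⟩, by simpa using hc⟩, rfl⟩

theorem fmcB_pos_sorted (s : List Char) (c : Char) :
    ((fmcB_pos s).getD c []).Pairwise (· < ·) := by
  rw [fmcB_pos_getD]
  exact List.Pairwise.map _ (fun a b h => h) ((PySem.List.pairwise_lt_enumerate s 0).filter _)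

theorem sorted_getD_mono (lst : List Int) (hs : lst.Pairwise (· ≤ ·)) (i k : Nat)
    (hik : i ≤ k) (hk : k < lst.length) : lst.getD i 0 ≤ lst.getD k 0 := by
  rcases Nat.lt_or_ge i k with h | h
  · rw [lst.getD_eq_getElem 0 (lt_of_le_of_lt hik hk), lst.getD_eq_getElem 0 hk]
    exact List.pairwise_iff_getElem.mp hs i k _ _ h
  · have : i = k := le_antisymm hik h
    subst this; rfl

theorem fmcB_bisect_spec (lst : List Int) (x : Int) (hs : lst.Pairwise (· ≤ ·)) :
    ∀ (n lo hi : Nat), hi - lo ≤ n → lo ≤ hi → hi ≤ lst.length →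
      lo ≤ fmcB_bisect lst x lo hi ∧ fmcB_bisect lst x lo hi ≤ hi ∧
      (∀ i, lo ≤ i → i < fmcB_bisect lst x lo hi → lst.getD i 0 < x) ∧
      (∀ i, fmcB_bisect lst x lo hi ≤ i → i < hi → x ≤ lst.getD i 0) := by
  intro n
  induction n with
  | zero =>
    intro lo hi h hlh hhl
    have he : hi = lo := by omega
    subst he
    rw [fmcB_bisect]
    simp only [lt_irrefl, dite_false]
    exact ⟨le_rfl, le_rfl, fun i h1 h2 => absurd h2 (by omega), fun i h1 h2 => absurd h2 (by omega)⟩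
  | succ n ih =>
    intro lo hi h hlh hhl
    by_cases hlt : lo < hi
    · rw [fmcB_bisect]
      simp only [dif_pos hlt]
      set mid := (lo + hi) / 2 with hmid
      have hm1 : lo ≤ mid := by omega
      have hm2 : mid < hi := by omega
      by_cases hv : lst.getD mid 0 < x
      · simp only [if_pos hv]
        obtain ⟨h1, h2, h3, h4⟩ := ih (mid + 1) hi (by omega) (by omega) hhl
        refine ⟨by omega, h2, ?_, h4⟩
        intro i hi1 hi2
        rcases Nat.lt_or_ge i (mid + 1) with hc | hc
        · exact lt_of_le_of_lt (sorted_getD_mono lst hs i mid (by omega) (by omega)) hv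
        · exact h3 i hc hi2
      · simp only [if_neg hv]
        rw [not_lt] at hv
        obtain ⟨h1, h2, h3, h4⟩ := ih lo mid (by omega) (by omega) (by omega)
        refine ⟨h1, by omega, h3, ?_⟩
        intro i hi1 hi2
        rcases Nat.lt_or_ge i mid with hc | hc
        · exact h4 i hi1 hc
        · exact le_trans hv (sorted_getD_mono lst hs mid i hc (by omega))
    · rw [fmcB_bisect]
      simp only [dif_neg hlt]
      have : hi = lo := by omega
      subst this
      exact ⟨le_rfl, le_rfl, fun i h1 h2 => absurd h2 (by omega), fun i h1 h2 => absurd h2 (by omega)⟩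

theorem prefix_drop_singleton (c : Char) (s : List Char) (i : Nat) :
    [c] <+: s.drop i ↔ ∃ h : i < s.length, s[i] = c := by
  constructor
  · rintro ⟨t, ht⟩
    have hlen : i < s.length := by
      by_contra hge
      rw [List.drop_eq_nil_of_le (by omega)] at ht
      simp at ht
    refine ⟨hlen, ?_⟩
    have := congrArg List.head? ht
    simpa [List.head?_drop, List.getElem?_eq_getElem hlen] using this.symm
  · rintro ⟨h, hc⟩
    have : s.drop i = c :: s.drop (i + 1) := by
      rw [List.drop_eq_getElem_cons h, hc]
    rw [this]
    exact ⟨_, rfl⟩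

theorem fmc_step (s : List Char) (c : Char) (k : Nat) (hk : k ≤ s.length) :
    PySem.Chars.findFrom s [c] (k : Int) none =
      (if fmcB_bisect ((fmcB_pos s).getD c []) (k : Int) 0 ((fmcB_pos s).getD c []).length
          = ((fmcB_pos s).getD c []).length then -1
       else ((fmcB_pos s).getD c []).getD
          (fmcB_bisect ((fmcB_pos s).getD c []) (k : Int) 0 ((fmcB_pos s).getD c []).length) 0) := by
  have hs_lt := fmcB_pos_sorted s c
  have hs_le : ((fmcB_pos s).getD c []).Pairwise (· ≤ ·) := hs_lt.imp (fun h => le_of_lt h)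
  set P := (fmcB_pos s).getD c [] with hP
  set j := fmcB_bisect P (k : Int) 0 P.length with hj
  obtain ⟨-, hjle, h3, h4⟩ := fmcB_bisect_spec P (k : Int) hs_le P.length 0 P.length (by omega) (by omega) le_rfl
  by_cases hcase : j = P.length
  · rw [if_pos hcase]
    rw [PySem.Chars.findFrom_natCast_eq_neg_one_iff s [c] k hk]
    rw [List.singleton_infix_iff]
    intro hmem
    obtain ⟨i, hi, hieq⟩ := List.mem_iff_getElem.mp hmem
    rw [List.getElem_drop] at hieq
    have hilen : k + i < s.length := by
      have h2 := hi; rw [List.length_drop] at h2; omega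
    have hmemP : ((k + i : Nat) : Int) ∈ P := by
      rw [hP, fmcB_pos_mem]
      exact ⟨k + i, hilen, rfl, hieq⟩
    obtain ⟨t, ht, hteq⟩ := List.mem_iff_getElem.mp hmemP
    have hlt := h3 t (by omega) (by omega)
    rw [List.getD_eq_getElem _ _ ht, hteq] at hlt
    have : (k : Int) + i < k := by exact_mod_cast hlt
    omega
  · rw [if_neg hcase]
    have hjlt : j < P.length := by omega
    have hvge : (k : Int) ≤ P.getD j 0 := h4 j le_rfl hjlt
    have hvmem : P.getD j 0 ∈ P := by
      rw [List.getD_eq_getElem _ _ hjlt]; exact List.getElem_mem _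
    obtain ⟨m, hm, hveq, hmc⟩ := (fmcB_pos_mem s c _).mp (hP ▸ hvmem)
    have hkm : k ≤ m := by
      have h2 : (k : Int) ≤ (m : Int) := by rw [← hveq]; exact hvge
      exact_mod_cast h2
    have hinf : [c] <:+: s.drop k := by
      rw [List.singleton_infix_iff]
      have hgc : (s.drop k)[m - k]'(by rw [List.length_drop]; omega) = c := by
        rw [List.getElem_drop]
        have he : k + (m - k) = m := by omega
        simp only [he, hmc]
      exact hgc ▸ List.getElem_mem _
    have hne : PySem.Chars.findFrom s [c] (k : Int) none ≠ -1 := by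
      intro h0
      exact ((PySem.Chars.findFrom_natCast_eq_neg_one_iff s [c] k hk).mp h0) hinf
    obtain ⟨hkf, hpre, hmin⟩ := PySem.Chars.findFrom_natCast_spec s [c] k hk hne
    set f := PySem.Chars.findFrom s [c] (k : Int) none with hf
    have hf0 : (0 : Int) ≤ f := le_trans (by exact_mod_cast Nat.zero_le k) hkf
    obtain ⟨hflen, hfc⟩ := (prefix_drop_singleton c s f.toNat).mp hpre
    have hfmem : ((f.toNat : Nat) : Int) ∈ P := by
      rw [hP, fmcB_pos_mem]; exact ⟨f.toNat, hflen, rfl, hfc⟩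
    have hfnat : ((f.toNat : Nat) : Int) = f := Int.toNat_of_nonneg hf0
    rcases lt_trichotomy f (P.getD j 0) with hlt | heq | hgt
    · obtain ⟨t, ht, hteq⟩ := List.mem_iff_getElem.mp hfmem
      have htj : t < j := by
        by_contra hge
        have hmono := sorted_getD_mono P hs_le j t (by omega) ht
        rw [List.getD_eq_getElem _ _ ht, hteq, hfnat] at hmono
        omega
      have hc2 := h3 t (by omega) htj
      rw [List.getD_eq_getElem _ _ ht, hteq, hfnat] at hc2
      omega
    · exact heq
    · have hmf : m < f.toNat := by
        have h2 : (m : Int) < f := hveq ▸ hgt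
        omega
      exact absurd ((prefix_drop_singleton c s m).mpr ⟨hm, hmc⟩) (hmin m hkm hmf)

theorem fmc_loop_eq (s : List Char) :
    ∀ (pat : List Char) (acc : List (String × Int)) (k : Nat), k ≤ s.length →
      fmcA_loop s pat acc (k : Int) = fmcB_loop (fmcB_pos s) pat acc (k : Int) := by
  intro pat
  induction pat with
  | nil => intro acc k hk; rfl
  | cons c rest ih =>
    intro acc k hk
    rw [fmcA_loop, fmcB_loop]
    simp only []
    rw [fmc_step s c k hk]
    set P := (fmcB_pos s).getD c [] with hP
    set j := fmcB_bisect P (k : Int) 0 P.length with hj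
    by_cases hcase : j = P.length
    · simp only [if_pos hcase]
      norm_num
    · simp only [if_neg hcase]
      have hjlt : j < P.length := by
        have := (fmcB_bisect_spec P (k : Int) ((fmcB_pos_sorted s c).imp (fun h => le_of_lt h))
          P.length 0 P.length (by omega) (by omega) le_rfl).2.1
        omega
      have hvmem : P.getD j 0 ∈ P := by
        rw [List.getD_eq_getElem _ _ hjlt]; exact List.getElem_mem _
      obtain ⟨m, hm, hveq, hmc⟩ := (fmcB_pos_mem s c _).mp (hP ▸ hvmem)
      have hnotneg : ¬ P.getD j 0 < 0 := by rw [hveq]; omega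
      rw [if_neg hnotneg]
      have hcast : P.getD j 0 + 1 = ((m + 1 : Nat) : Int) := by rw [hveq]; push_cast; ring
      rw [hcast]
      exact ih _ (m + 1) (by omega)

-- ===== VERDICT (by name: the statement is the Claim_ definition above) =====
theorem find_match_characters_spec : Claim_equal_find_match_characters := by
  intro string pattern _
  show find_match_characters string pattern = find_match_characters_alt string pattern
  unfold find_match_characters find_match_characters_alt
  simp only []
  by_cases h1 : string.toList = [] ∨ pattern.toList = []
  · rw [if_pos h1, if_pos (by tauto)]
  · rw [if_neg h1]
    by_cases h2 : string.toList.head? ≠ pattern.toList.head?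
    · rw [if_pos h2, if_pos (by tauto)]
    · rw [if_neg h2, if_neg (by tauto)]
      exact_mod_cast fmc_loop_eq string.toList pattern.toList [] 0 (Nat.zero_le _)
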